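-- pv_equiv track=rewrite | github.com/hamiltonparker/learning | HNFGen.py | base_mono_2
-- ===== SOURCE A (Python) =====
-- import copy
--
-- def find_HNF_diagonal(size):
--
--     """Generats allowable values for the diagonal of an HNF
--        given a particular size
--
--     Args:
--         size (int): The determinate of the HNF matricies
--
--     Returns:
--         diags_list (list, int): a list of allowable values for a given size
--     """
--
--     diags_list = []
--     for i in range(size):
--         a = i + 1
--         if (size / a) % 1 == 0:
--             for j in range(size // a):
--                 c = j + 1
--                 if (size / a / c) % 1 == 0:
--                     f = size // a // c
--                     diags_list.append([a,c,f])
--     return diags_list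
--
-- def base_mono_2(size):
--
--     """Generates symmetry preserving HNF's of a given size
--        for a base centered monoclinic basis
--
--     Args:
--         size (int): The determinate of the HNF matricies
--
--     Returns:
--         list (int): The generated HNF matricies
--     """
--
--     symHNF = []
--     diags = find_HNF_diagonal(size)
--     for i in diags:
--         a = i[0]
--         c = i[1]
--         f = i[2]
--         for j in range(c):
--             b = j
--             if ((a + 2 * b) / c) % 1 == 0:
--                 for k in range (f):
--                     e = k
--                     if (2 * e / f) % 1 == 0:
--                         if ((a + 2 * b) * e / (c * f)) % 1 == 0:
--                             for l in range(f):
--                                 d = l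
--                                 symHNF.append(copy.deepcopy([[a,0,0], [b,c,0], [d,e,f]]))
--     return symHNF
-- ===== SOURCE B (Python) =====
-- def base_mono_2(size):
--     """Same HNFs as A, but b and e are found by solving the divisibility
--     congruences in closed form instead of scanning 0..c-1 / 0..f-1."""
--     divs = [i for i in range(1, size + 1) if size % i == 0]
--     out = []
--     for a in divs:
--         n = size // a
--         for c in divs:
--             if n % c != 0:
--                 continue
--             f = n // c
--             # solutions b in [0, c) of 2b = -a (mod c)
--             if c % 2 == 1:
--                 bs = [(-a * ((c + 1) // 2)) % c]
--             elif a % 2 == 1: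
--                 bs = []
--             else:
--                 h = c // 2
--                 b0 = (-(a // 2)) % h
--                 bs = [b0, b0 + h]
--             # solutions e in [0, f) of f | 2e
--             es = [0] if f % 2 == 1 else [0, f // 2]
--             cf = c * f
--             for b in bs:
--                 t = a + 2 * b
--                 for e in es:
--                     if (t * e) % cf == 0:
--                         for d in range(f):
--                             out.append([[a, 0, 0], [b, c, 0], [d, e, f]])
--     return out
-- ===== Notes on version B (the rewrite author's own statement) =====
-- stated objective: faster
-- what changed: B builds the divisor list once and solves the two divisibility congruences (c | a+2b and f | 2e) in closed form by modular arithmetic, instead of A's per-divisor range scan and the two inner scans over range(c) and range(f).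
import Mathlib
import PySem

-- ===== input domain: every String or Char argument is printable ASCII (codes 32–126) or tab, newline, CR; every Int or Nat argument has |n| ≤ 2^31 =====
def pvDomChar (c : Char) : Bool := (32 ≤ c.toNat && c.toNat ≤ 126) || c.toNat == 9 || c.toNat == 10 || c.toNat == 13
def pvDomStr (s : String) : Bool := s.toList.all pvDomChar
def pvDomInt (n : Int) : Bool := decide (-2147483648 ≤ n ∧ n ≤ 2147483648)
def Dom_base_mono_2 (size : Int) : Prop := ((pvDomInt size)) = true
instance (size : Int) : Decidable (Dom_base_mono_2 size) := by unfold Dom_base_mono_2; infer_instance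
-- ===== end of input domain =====

-- B replaces A's linear scans (the per-divisor range scans and the b/e scans over range(c)/range(f))
-- by a divisor list built once and closed-form modular solutions of the two congruences.

-- ===== PORT A =====
-- Python's float tests `(size / a) % 1 == 0` etc. are exact divisibility tests for the |size| ≤ 2^31
-- inputs of Dom_base_mono_2 (all intermediate quotients/products are below 2^53), ported as `mod · · = 0`.
def find_HNF_diagonal (size : Int) : List (List Int) :=
  (PySem.List.pyRange 0 size 1).foldl (fun acc i =>
    let a := i + 1
    if PySem.Int.mod size a = 0 then
      (PySem.List.pyRange 0 (PySem.Int.floordiv size a) 1).foldl (fun acc2 j =>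
        let c := j + 1
        if PySem.Int.mod (PySem.Int.floordiv size a) c = 0 then
          let f := PySem.Int.floordiv (PySem.Int.floordiv size a) c
          acc2 ++ [[a, c, f]]
        else acc2) acc
    else acc) []

def base_mono_2 (size : Int) : List (List (List Int)) :=
  (find_HNF_diagonal size).foldl (fun acc i =>
    let a := PySem.List.pyGetD i 0 0
    let c := PySem.List.pyGetD i 1 0
    let f := PySem.List.pyGetD i 2 0
    (PySem.List.pyRange 0 c 1).foldl (fun acc j =>
      let b := j
      if PySem.Int.mod (a + 2 * b) c = 0 then
        (PySem.List.pyRange 0 f 1).foldl (fun acc k =>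
          let e := k
          if PySem.Int.mod (2 * e) f = 0 then
            if PySem.Int.mod ((a + 2 * b) * e) (c * f) = 0 then
              (PySem.List.pyRange 0 f 1).foldl (fun acc l =>
                let d := l
                acc ++ [[[a, 0, 0], [b, c, 0], [d, e, f]]]) acc
            else acc
          else acc) acc
      else acc) acc) []

-- ===== PORT B =====
def base_mono_2_alt (size : Int) : List (List (List Int)) :=
  let divs := (PySem.List.pyRange 1 (size + 1) 1).filter (fun i => PySem.Int.mod size i == 0)
  divs.foldl (fun out a =>
    let n := PySem.Int.floordiv size a
    divs.foldl (fun out c =>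
      if PySem.Int.mod n c ≠ 0 then out
      else
        let f := PySem.Int.floordiv n c
        let bs : List Int :=
          if PySem.Int.mod c 2 = 1 then
            [PySem.Int.mod (-a * (PySem.Int.floordiv (c + 1) 2)) c]
          else if PySem.Int.mod a 2 = 1 then []
          else
            let h := PySem.Int.floordiv c 2
            let b0 := PySem.Int.mod (-(PySem.Int.floordiv a 2)) h
            [b0, b0 + h]
        let es : List Int :=
          if PySem.Int.mod f 2 = 1 then [0] else [0, PySem.Int.floordiv f 2]
        let cf := c * f
        bs.foldl (fun out b =>
          let t := a + 2 * b
          es.foldl (fun out e =>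
            if PySem.Int.mod (t * e) cf = 0 then
              (PySem.List.pyRange 0 f 1).foldl (fun out d =>
                out ++ [[[a, 0, 0], [b, c, 0], [d, e, f]]]) out
            else out) out) out) out) []

-- ===== PRECONDITION & SPEC =====
def Spec_base_mono_2 (size : Int) (out : List (List (List Int))) : Prop := out = base_mono_2_alt size
instance (size : Int) (out : List (List (List Int))) : Decidable (Spec_base_mono_2 size out) := by unfold Spec_base_mono_2; infer_instance

-- ===== CLAIM (what is proved, stated in full; the proofs are below) =====
def Claim_equal_base_mono_2 : Prop := ∀ (size : Int), Dom_base_mono_2 size → Spec_base_mono_2 size (base_mono_2 size)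

-- ===== LEMMAS AND PROOFS =====

-- the HNF block generated for one diagonal (a,c,f) and one pair (b,e): the common innermost d-loop
def pvBlock (a c f b e : Int) : List (List (List Int)) :=
  (PySem.List.pyRange 0 f 1).map (fun d => [[a, 0, 0], [b, c, 0], [d, e, f]])

-- the common body of the e-level: cond2 then the d-loop
def pvEBody (a c f b : Int) : Int → List (List (List Int)) :=
  fun e => if PySem.Int.mod ((a + 2 * b) * e) (c * f) = 0 then pvBlock a c f b e else []

-- the b/e levels of one diagonal in filtered form
def pvBE (a c f : Int) : List (List (List Int)) :=
  ((PySem.List.pyRange 0 c 1).filter (fun b => decide (PySem.Int.mod (a + 2 * b) c = 0))).flatMap (fun b =>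
    ((PySem.List.pyRange 0 f 1).filter (fun e => decide (PySem.Int.mod (2 * e) f = 0))).flatMap
      (pvEBody a c f b))

-- the ascending positive divisors of n
def pvDivs (n : Int) : List Int :=
  (PySem.List.pyRange 1 (n + 1) 1).filter (fun c => decide (PySem.Int.mod n c = 0))

-- canonical form both ports are reduced to
def pvCanon (size : Int) : List (List (List Int)) :=
  (pvDivs size).flatMap (fun a =>
    (pvDivs (PySem.Int.floordiv size a)).flatMap (fun c =>
      pvBE a c (PySem.Int.floordiv (PySem.Int.floordiv size a) c)))

theorem pv_foldl_flatMap {α β : Type} (l : List α) (f : List β → α → List β) (g : α → List β)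
    (h : ∀ acc x, f acc x = acc ++ g x) (acc : List β) :
    l.foldl f acc = acc ++ l.flatMap g := by
  induction l generalizing acc with
  | nil => simp
  | cons x xs ih => simp [h, ih, List.append_assoc]

theorem pv_flatMap_filter {β : Type} (l : List Int) (q : Int → Prop) [DecidablePred q] (g : Int → List β) :
    (l.filter (fun x => decide (q x))).flatMap g = l.flatMap (fun x => if q x then g x else []) := by
  induction l with
  | nil => rfl
  | cons x xs ih => by_cases h : q x <;> simp [h, ih]

theorem pv_shift (n : Int) :
    (PySem.List.pyRange 0 n 1).map (fun i => i + 1) = PySem.List.pyRange 1 (n + 1) 1 := by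
  rw [PySem.List.pyRange_one, PySem.List.pyRange_one, List.map_map]
  have h : (n - 0).toNat = (n + 1 - 1).toNat := by omega
  rw [h]
  apply List.map_congr_left
  intro k _
  simp
  ring

-- a flatMap over the divisors of n is A's guarded scan over range(n)
theorem pv_divflat {β : Type} (n : Int) (G : Int → List β) :
    (pvDivs n).flatMap G =
      (PySem.List.pyRange 0 n 1).flatMap
        (fun i => if PySem.Int.mod n (i + 1) = 0 then G (i + 1) else []) := by
  rw [pvDivs, ← pv_shift, List.filter_map]
  simp only [Function.comp_def]
  rw [List.flatMap_map, pv_flatMap_filter]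

theorem pv_filter_singleton (n t : Int) (p : Int → Bool) (h0 : 0 ≤ t) (h1 : t < n) (hp : p t = true)
    (hu : ∀ x, 0 ≤ x → x < n → p x = true → x = t) :
    (PySem.List.pyRange 0 n 1).filter p = [t] := by
  have e1 : (PySem.List.pyRange 0 t 1).filter p = [] := by
    rw [List.filter_eq_nil_iff]
    intro x hx hpx
    rw [PySem.List.mem_pyRange_one] at hx
    have := hu x (by omega) (by omega) hpx; omega
  have e3 : (PySem.List.pyRange (t+1) n 1).filter p = [] := by
    rw [List.filter_eq_nil_iff]
    intro x hx hpx
    rw [PySem.List.mem_pyRange_one] at hx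
    have := hu x (by omega) (by omega) hpx; omega
  rw [PySem.List.pyRange_one_append 0 t n h0 (by omega),
      PySem.List.pyRange_one_append t (t+1) n (by omega) (by omega),
      PySem.List.pyRange_one_singleton]
  simp [List.filter_append, e1, e3, hp]

theorem pv_filter_pair (n t s : Int) (p : Int → Bool) (h0 : 0 ≤ t) (hts : t < s) (h1 : s < n)
    (hp : p t = true) (hps : p s = true)
    (hu : ∀ x, 0 ≤ x → x < n → p x = true → x = t ∨ x = s) :
    (PySem.List.pyRange 0 n 1).filter p = [t, s] := by
  have e1 : (PySem.List.pyRange 0 t 1).filter p = [] := by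
    rw [List.filter_eq_nil_iff]
    intro x hx hpx
    rw [PySem.List.mem_pyRange_one] at hx
    have := hu x (by omega) (by omega) hpx; omega
  have e2 : (PySem.List.pyRange (t+1) s 1).filter p = [] := by
    rw [List.filter_eq_nil_iff]
    intro x hx hpx
    rw [PySem.List.mem_pyRange_one] at hx
    have := hu x (by omega) (by omega) hpx; omega
  have e3 : (PySem.List.pyRange (s+1) n 1).filter p = [] := by
    rw [List.filter_eq_nil_iff]
    intro x hx hpx
    rw [PySem.List.mem_pyRange_one] at hx
    have := hu x (by omega) (by omega) hpx; omega
  rw [PySem.List.pyRange_one_append 0 t n h0 (by omega),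
      PySem.List.pyRange_one_append t (t+1) n (by omega) (by omega),
      PySem.List.pyRange_one_append (t+1) s n (by omega) (by omega),
      PySem.List.pyRange_one_append s (s+1) n (by omega) (by omega),
      PySem.List.pyRange_one_singleton, PySem.List.pyRange_one_singleton]
  simp [List.filter_append, e1, e2, e3, hp, hps]

-- odd c: c ∣ 2x → c ∣ x
theorem pv_odd_dvd_cancel_two (c x : Int) (h : c % 2 = 1) (hd : c ∣ 2 * x) : c ∣ x := by
  obtain ⟨k, hk⟩ := hd
  rcases Int.even_or_odd k with ⟨m, hm⟩ | ⟨m, hm⟩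
  · exact ⟨m, by have : 2 * x = 2 * (c * m) := by rw [hk, hm]; ring
                 omega⟩
  · exfalso
    have : 2 * x = 2 * (c * m) + c := by rw [hk, hm]; ring
    omega

-- closed form for the b-scan, odd c
theorem pv_bs_odd (a c : Int) (hc : 0 < c) (hodd : c % 2 = 1) :
    (PySem.List.pyRange 0 c 1).filter (fun b => decide (PySem.Int.mod (a + 2 * b) c = 0)) =
      [PySem.Int.mod (-a * (PySem.Int.floordiv (c + 1) 2)) c] := by
  rw [PySem.Int.floordiv_eq_ediv_of_pos (by omega), PySem.Int.mod_eq_emod_of_pos hc]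
  have hdvd : c ∣ a + 2 * ((-a * ((c+1)/2)) % c) := by
    have h2i : 2 * ((c+1)/2) = c + 1 := by
      rw [mul_comm]; exact Int.ediv_mul_cancel (by omega)
    have hmm : (-a * ((c+1)/2)) % c ≡ -a * ((c+1)/2) [ZMOD c] := Int.emod_emod_of_dvd _ dvd_rfl
    have hval : a + 2 * (-a * ((c+1)/2)) = -(a * c) := by
      rw [show (2:Int) * (-a * ((c+1)/2)) = -a * (2 * ((c+1)/2)) by ring, h2i]; ring
    rw [← Int.modEq_zero_iff_dvd]
    calc a + 2 * ((-a * ((c+1)/2)) % c)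
        ≡ a + 2 * (-a * ((c+1)/2)) [ZMOD c] := Int.ModEq.add_left a (Int.ModEq.mul_left 2 hmm)
      _ = -(a*c) := hval
      _ ≡ 0 [ZMOD c] := Int.modEq_zero_iff_dvd.mpr ⟨-a, by ring⟩
  apply pv_filter_singleton c ((-a * ((c+1)/2)) % c) _
    (Int.emod_nonneg _ (by omega)) (Int.emod_lt_of_pos _ hc)
  · rw [decide_eq_true_iff, PySem.Int.mod_eq_zero_iff_dvd]
    exact hdvd
  · intro x hx0 hx1 hpx
    rw [decide_eq_true_iff, PySem.Int.mod_eq_zero_iff_dvd] at hpx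
    have hsub : c ∣ 2 * (x - ((-a * ((c+1)/2)) % c)) := by
      have := Int.dvd_sub hpx hdvd
      have hE : (a + 2*x) - (a + 2 * ((-a * ((c+1)/2)) % c)) = 2 * (x - ((-a * ((c+1)/2)) % c)) := by ring
      rwa [hE] at this
    have := pv_odd_dvd_cancel_two c _ hodd hsub
    have hb0 : 0 ≤ (-a * ((c+1)/2)) % c := Int.emod_nonneg _ (by omega)
    have hb1 : (-a * ((c+1)/2)) % c < c := Int.emod_lt_of_pos _ hc
    have := Int.eq_zero_of_abs_lt_dvd this (by rw [abs_lt]; omega)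
    omega

-- closed form for the b-scan, even c odd a: no solution
theorem pv_bs_even_odd (a c : Int) (hc : 0 < c) (hce : c % 2 = 0) (hao : a % 2 = 1) :
    (PySem.List.pyRange 0 c 1).filter (fun b => decide (PySem.Int.mod (a + 2 * b) c = 0)) = [] := by
  rw [List.filter_eq_nil_iff]
  intro x _ hpx
  rw [decide_eq_true_iff, PySem.Int.mod_eq_zero_iff_dvd] at hpx
  have h2 : (2:Int) ∣ a + 2 * x := dvd_trans (by omega) hpx
  omega

-- closed form for the b-scan, even c even a
theorem pv_bs_even_even (a c : Int) (hc : 0 < c) (hce : c % 2 = 0) (hae : a % 2 = 0) :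
    (PySem.List.pyRange 0 c 1).filter (fun b => decide (PySem.Int.mod (a + 2 * b) c = 0)) =
      [PySem.Int.mod (-(PySem.Int.floordiv a 2)) (PySem.Int.floordiv c 2),
       PySem.Int.mod (-(PySem.Int.floordiv a 2)) (PySem.Int.floordiv c 2) + PySem.Int.floordiv c 2] := by
  rw [PySem.Int.floordiv_eq_ediv_of_pos (show (0:Int) < 2 by omega),
      PySem.Int.floordiv_eq_ediv_of_pos (show (0:Int) < 2 by omega),
      PySem.Int.mod_eq_emod_of_pos (show 0 < c / 2 by omega)]
  have hh : 0 < c / 2 := by omega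
  have hc2 : c = 2 * (c / 2) := by omega
  have ha2 : a = 2 * (a / 2) := by omega
  have ht0 : 0 ≤ (-(a/2)) % (c/2) := Int.emod_nonneg _ (by omega)
  have ht1 : (-(a/2)) % (c/2) < c/2 := Int.emod_lt_of_pos _ hh
  have hkey : ∀ x : Int, c ∣ a + 2 * x ↔ (c/2) ∣ (a/2 + x) := by
    intro x
    have h3 : ∀ k : Int, c * k = 2 * (c/2*k) := by
      intro k
      conv_lhs => rw [hc2]
      ring
    constructor
    · rintro ⟨k, hk⟩
      exact ⟨k, by have := h3 k; omega⟩
    · rintro ⟨k, hk⟩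
      exact ⟨k, by have := h3 k; omega⟩
  have hdvd : (c/2) ∣ (a/2 + (-(a/2)) % (c/2)) := by
    have hmm : (-(a/2)) % (c/2) ≡ -(a/2) [ZMOD c/2] := Int.emod_emod_of_dvd _ dvd_rfl
    rw [← Int.modEq_zero_iff_dvd]
    calc a/2 + (-(a/2)) % (c/2) ≡ a/2 + -(a/2) [ZMOD c/2] := Int.ModEq.add_left _ hmm
      _ = 0 := by ring
      _ ≡ 0 [ZMOD c/2] := Int.ModEq.refl 0
  apply pv_filter_pair c ((-(a/2)) % (c/2)) ((-(a/2)) % (c/2) + c/2) _ ht0 (by omega) (by omega)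
  · rw [decide_eq_true_iff, PySem.Int.mod_eq_zero_iff_dvd, hkey]
    exact hdvd
  · rw [decide_eq_true_iff, PySem.Int.mod_eq_zero_iff_dvd, hkey]
    have : a/2 + ((-(a/2)) % (c/2) + c/2) = (a/2 + (-(a/2)) % (c/2)) + c/2 := by ring
    rw [this]
    exact dvd_add hdvd (Dvd.intro 1 (by ring))
  · intro x hx0 hx1 hpx
    rw [decide_eq_true_iff, PySem.Int.mod_eq_zero_iff_dvd, hkey] at hpx
    obtain ⟨k, hk⟩ := Int.dvd_sub hpx hdvd
    have hk' : x - (-(a/2)) % (c/2) = (c/2) * k := by omega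
    have hl : -(c/2) < (c/2) * k := by omega
    have hr : (c/2) * k < 2 * (c/2) := by omega
    have hk0 : 0 ≤ k := by nlinarith
    have hk1 : k ≤ 1 := by nlinarith
    interval_cases k
    · left; omega
    · right; omega

-- closed form for the e-scan
theorem pv_es_odd (f : Int) (hf : 0 < f) (hodd : f % 2 = 1) :
    (PySem.List.pyRange 0 f 1).filter (fun e => decide (PySem.Int.mod (2 * e) f = 0)) = [0] := by
  apply pv_filter_singleton f 0 _ le_rfl hf
  · rw [decide_eq_true_iff, PySem.Int.mod_eq_zero_iff_dvd]
    exact ⟨0, by ring⟩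
  · intro x hx0 hx1 hpx
    rw [decide_eq_true_iff, PySem.Int.mod_eq_zero_iff_dvd] at hpx
    have := pv_odd_dvd_cancel_two f x hodd hpx
    exact Int.eq_zero_of_abs_lt_dvd this (by rw [abs_lt]; omega)

theorem pv_es_even (f : Int) (hf : 0 < f) (heven : f % 2 = 0) :
    (PySem.List.pyRange 0 f 1).filter (fun e => decide (PySem.Int.mod (2 * e) f = 0)) =
      [0, PySem.Int.floordiv f 2] := by
  rw [PySem.Int.floordiv_eq_ediv_of_pos (show (0:Int) < 2 by omega)]
  have hg : 0 < f / 2 := by omega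
  apply pv_filter_pair f 0 (f/2) _ le_rfl (by omega) (by omega)
  · rw [decide_eq_true_iff, PySem.Int.mod_eq_zero_iff_dvd]
    exact ⟨0, by ring⟩
  · rw [decide_eq_true_iff, PySem.Int.mod_eq_zero_iff_dvd]
    exact ⟨1, by omega⟩
  · intro x hx0 hx1 hpx
    rw [decide_eq_true_iff, PySem.Int.mod_eq_zero_iff_dvd] at hpx
    obtain ⟨k, hk⟩ := hpx
    have hl : 0 ≤ f * k := by omega
    have hr : f * k < 2 * f := by omega
    have hk0 : 0 ≤ k := by nlinarith
    have hk1 : k ≤ 1 := by nlinarith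
    interval_cases k
    · left; omega
    · right; omega

-- the ascending divisor scan of n equals the scan of N restricted to divisors of n, when n ∣ N
theorem pv_divs_shrink (N n : Int) (hn : 0 < n) (hd : n ∣ N) (hle : n ≤ N) :
    (PySem.List.pyRange 1 (N + 1) 1).filter
        (fun c => decide (PySem.Int.mod N c = 0) && decide (PySem.Int.mod n c = 0)) =
      (PySem.List.pyRange 1 (n + 1) 1).filter (fun c => decide (PySem.Int.mod n c = 0)) := by
  have hcong : (PySem.List.pyRange 1 (N + 1) 1).filter
      (fun c => decide (PySem.Int.mod N c = 0) && decide (PySem.Int.mod n c = 0)) =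
      (PySem.List.pyRange 1 (N + 1) 1).filter (fun c => decide (PySem.Int.mod n c = 0)) := by
    apply List.filter_congr
    intro x _
    by_cases h : PySem.Int.mod n x = 0
    · have hx : PySem.Int.mod N x = 0 := by
        rw [PySem.Int.mod_eq_zero_iff_dvd] at h ⊢
        exact dvd_trans h hd
      simp [h, hx]
    · simp [h]
  have htail : (PySem.List.pyRange (n+1) (N+1) 1).filter (fun c => decide (PySem.Int.mod n c = 0)) = [] := by
    rw [List.filter_eq_nil_iff]
    intro x hx hpx
    rw [PySem.List.mem_pyRange_one] at hx
    rw [decide_eq_true_iff, PySem.Int.mod_eq_zero_iff_dvd] at hpx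
    have := Int.le_of_dvd hn hpx
    omega
  rw [hcong, PySem.List.pyRange_one_append 1 (n+1) (N+1) (by omega) (by omega), List.filter_append,
      htail, List.append_nil]

-- A's inner three loops (b, e, d) for one diagonal equal pvBE
theorem pv_A_inner (a c f : Int) (acc : List (List (List Int))) :
    (PySem.List.pyRange 0 c 1).foldl (fun acc j =>
      let b := j
      if PySem.Int.mod (a + 2 * b) c = 0 then
        (PySem.List.pyRange 0 f 1).foldl (fun acc k =>
          let e := k
          if PySem.Int.mod (2 * e) f = 0 then
            if PySem.Int.mod ((a + 2 * b) * e) (c * f) = 0 then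
              (PySem.List.pyRange 0 f 1).foldl (fun acc l =>
                let d := l
                acc ++ [[[a, 0, 0], [b, c, 0], [d, e, f]]]) acc
            else acc
          else acc) acc
      else acc) acc = acc ++ pvBE a c f := by
  have hblock : ∀ (acc : List (List (List Int))) (b e : Int),
      (PySem.List.pyRange 0 f 1).foldl (fun acc l =>
        let d := l
        acc ++ [[[a, 0, 0], [b, c, 0], [d, e, f]]]) acc = acc ++ pvBlock a c f b e := by
    intro acc b e
    exact PySem.List.foldl_append_singleton_eq_map (fun d => [[a, 0, 0], [b, c, 0], [d, e, f]]) _ _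
  have he : ∀ (acc : List (List (List Int))) (b : Int),
      (PySem.List.pyRange 0 f 1).foldl (fun acc k =>
        let e := k
        if PySem.Int.mod (2 * e) f = 0 then
          if PySem.Int.mod ((a + 2 * b) * e) (c * f) = 0 then
            (PySem.List.pyRange 0 f 1).foldl (fun acc l =>
              let d := l
              acc ++ [[[a, 0, 0], [b, c, 0], [d, e, f]]]) acc
          else acc
        else acc) acc
      = acc ++ ((PySem.List.pyRange 0 f 1).filter
          (fun e => decide (PySem.Int.mod (2 * e) f = 0))).flatMap (pvEBody a c f b) := by
    intro acc b
    rw [pv_flatMap_filter]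
    refine pv_foldl_flatMap _ _ _ ?_ acc
    intro acc e
    by_cases h1 : PySem.Int.mod (2 * e) f = 0
    · by_cases h2 : PySem.Int.mod ((a + 2 * b) * e) (c * f) = 0
      · rw [if_pos h1, if_pos h2, hblock]
        simp [h1, h2, pvEBody]
      · rw [if_pos h1, if_neg h2]
        simp [h1, h2, pvEBody]
    · rw [if_neg h1]
      simp [h1]
  rw [pvBE, pv_flatMap_filter]
  refine pv_foldl_flatMap _ _ _ ?_ acc
  intro acc b
  by_cases h : PySem.Int.mod (a + 2 * b) c = 0
  · rw [if_pos h, he acc b]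
    simp [h]
  · rw [if_neg h]
    simp [h]

-- A's diagonal generator as a guarded scan
theorem pv_A_diag (size : Int) : find_HNF_diagonal size =
    (PySem.List.pyRange 0 size 1).flatMap (fun i =>
      if PySem.Int.mod size (i+1) = 0 then
        ((PySem.List.pyRange 0 (PySem.Int.floordiv size (i+1)) 1).filter
           (fun j => decide (PySem.Int.mod (PySem.Int.floordiv size (i+1)) (j+1) = 0))).map
          (fun j => [i+1, j+1, PySem.Int.floordiv (PySem.Int.floordiv size (i+1)) (j+1)])
      else []) := by
  unfold find_HNF_diagonal
  rw [pv_foldl_flatMap _ _ (fun i =>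
    if PySem.Int.mod size (i+1) = 0 then
      ((PySem.List.pyRange 0 (PySem.Int.floordiv size (i+1)) 1).filter
         (fun j => decide (PySem.Int.mod (PySem.Int.floordiv size (i+1)) (j+1) = 0))).map
        (fun j => [i+1, j+1, PySem.Int.floordiv (PySem.Int.floordiv size (i+1)) (j+1)])
    else []) ?_ [], List.nil_append]
  intro acc i
  simp only []
  split_ifs with h
  · rw [PySem.List.foldl_append_ite]
  · simp

-- A reduced to the canonical form
theorem pv_A_canon (size : Int) : base_mono_2 size = pvCanon size := by
  have h1 : base_mono_2 size = (find_HNF_diagonal size).flatMap (fun i =>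
      pvBE (PySem.List.pyGetD i 0 0) (PySem.List.pyGetD i 1 0) (PySem.List.pyGetD i 2 0)) := by
    unfold base_mono_2
    rw [pv_foldl_flatMap _ _ (fun i =>
      pvBE (PySem.List.pyGetD i 0 0) (PySem.List.pyGetD i 1 0) (PySem.List.pyGetD i 2 0)) ?_ [],
      List.nil_append]
    intro acc i
    exact pv_A_inner (PySem.List.pyGetD i 0 0) (PySem.List.pyGetD i 1 0) (PySem.List.pyGetD i 2 0) acc
  rw [h1, pv_A_diag, pvCanon, pv_divflat, List.flatMap_assoc]
  apply List.flatMap_congr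
  intro i _
  by_cases h : PySem.Int.mod size (i + 1) = 0
  · rw [if_pos h, if_pos h, pv_divflat, List.flatMap_map, pv_flatMap_filter]
    apply List.flatMap_congr
    intro j _
    by_cases h2 : PySem.Int.mod (PySem.Int.floordiv size (i+1)) (j+1) = 0
    · rw [if_pos h2, if_pos h2]
      simp [pysem]
    · rw [if_neg h2, if_neg h2]
  · simp [h]

-- B reduced to the canonical form
theorem pv_B_canon (size : Int) : base_mono_2_alt size = pvCanon size := by
  have hpred : (fun i => PySem.Int.mod size i == 0) = (fun i => decide (PySem.Int.mod size i = 0)) := by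
    funext i
    by_cases h : PySem.Int.mod size i = 0 <;> simp [h]
  -- structural normalization of B's nested loops
  have hB1 : base_mono_2_alt size =
      (pvDivs size).flatMap (fun a =>
        (pvDivs size).flatMap (fun c =>
          if PySem.Int.mod (PySem.Int.floordiv size a) c ≠ 0 then [] else
            (if PySem.Int.mod c 2 = 1 then
               [PySem.Int.mod (-a * (PySem.Int.floordiv (c + 1) 2)) c]
             else if PySem.Int.mod a 2 = 1 then []
             else [PySem.Int.mod (-(PySem.Int.floordiv a 2)) (PySem.Int.floordiv c 2),
                   PySem.Int.mod (-(PySem.Int.floordiv a 2)) (PySem.Int.floordiv c 2) + PySem.Int.floordiv c 2]).flatMap (fun b =>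
              (if PySem.Int.mod (PySem.Int.floordiv (PySem.Int.floordiv size a) c) 2 = 1 then ([0] : List Int)
               else [0, PySem.Int.floordiv (PySem.Int.floordiv (PySem.Int.floordiv size a) c) 2]).flatMap
                (pvEBody a c (PySem.Int.floordiv (PySem.Int.floordiv size a) c) b)))) := by
    unfold base_mono_2_alt
    simp only [hpred]
    rw [pvDivs, pv_foldl_flatMap _ _ _ ?_ [], List.nil_append]
    intro out a
    refine pv_foldl_flatMap _ _ _ ?_ out
    intro out c
    by_cases hg : PySem.Int.mod (PySem.Int.floordiv size a) c = 0
    · rw [if_neg (not_not_intro hg), if_neg (not_not_intro hg)]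
      refine pv_foldl_flatMap _ _ _ ?_ out
      intro out b
      refine pv_foldl_flatMap _ _ _ ?_ out
      intro out e
      by_cases h3 : PySem.Int.mod ((a + 2 * b) * e)
          (c * PySem.Int.floordiv (PySem.Int.floordiv size a) c) = 0
      · rw [if_pos h3, PySem.List.foldl_append_singleton_eq_map
            (fun d => [[a, 0, 0], [b, c, 0],
              [d, e, PySem.Int.floordiv (PySem.Int.floordiv size a) c]]) _ _]
        simp [pvEBody, pvBlock, h3]
      · rw [if_neg h3]
        simp [pvEBody, h3]
    · rw [if_pos hg, if_pos hg]
      simp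
  rw [hB1, pvCanon]
  apply List.flatMap_congr
  intro a ha
  rw [pvDivs, List.mem_filter, PySem.List.mem_pyRange_one] at ha
  obtain ⟨⟨ha1, ha2⟩, had⟩ := ha
  rw [decide_eq_true_eq, PySem.Int.mod_eq_zero_iff_dvd] at had
  have hsz : 0 < size := by omega
  have hapos : 0 < a := by omega
  have hne : PySem.Int.floordiv size a = size / a := PySem.Int.floordiv_eq_ediv_of_pos hapos
  have hna : (size / a) * a = size := Int.ediv_mul_cancel had
  have hn1 : 0 < size / a := by
    by_contra h
    push Not at h
    nlinarith [hna, hsz, hapos]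
  have hns : size / a ∣ size := ⟨a, hna.symm⟩
  have hnle : size / a ≤ size := Int.le_of_dvd hsz hns
  have hguard : ∀ (Y : Int → List (List (List Int))),
      (pvDivs size).flatMap (fun c =>
        if PySem.Int.mod (PySem.Int.floordiv size a) c ≠ 0 then [] else Y c) =
      ((pvDivs size).filter (fun c => decide (PySem.Int.mod (PySem.Int.floordiv size a) c = 0))).flatMap Y := by
    intro Y
    rw [pv_flatMap_filter]
    apply List.flatMap_congr
    intro c _
    by_cases h : PySem.Int.mod (PySem.Int.floordiv size a) c = 0
    · rw [if_neg (not_not_intro h), if_pos h]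
    · rw [if_pos h, if_neg h]
  have hdd : (pvDivs size).filter
      (fun c => decide (PySem.Int.mod (PySem.Int.floordiv size a) c = 0)) =
      pvDivs (PySem.Int.floordiv size a) := by
    rw [pvDivs, List.filter_filter, pvDivs, hne]
    rw [← pv_divs_shrink size (size / a) hn1 hns hnle]
    apply List.filter_congr
    intro x _
    exact Bool.and_comm _ _
  rw [hguard, hdd]
  apply List.flatMap_congr
  intro c hc
  rw [pvDivs, List.mem_filter, PySem.List.mem_pyRange_one] at hc
  obtain ⟨⟨hc1, hc2⟩, hcd⟩ := hc
  rw [decide_eq_true_eq, PySem.Int.mod_eq_zero_iff_dvd] at hcd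
  have hcpos : 0 < c := by omega
  have hfe : PySem.Int.floordiv (PySem.Int.floordiv size a) c = (size / a) / c := by
    rw [hne]; exact PySem.Int.floordiv_eq_ediv_of_pos hcpos
  have hfa : ((size / a) / c) * c = size / a := Int.ediv_mul_cancel (by rwa [hne] at hcd)
  have hf1 : 0 < (size / a) / c := by
    by_contra h
    push Not at h
    nlinarith [hfa, hn1, hcpos]
  have hbs : (PySem.List.pyRange 0 c 1).filter
      (fun b => decide (PySem.Int.mod (a + 2 * b) c = 0)) =
      (if PySem.Int.mod c 2 = 1 then
         [PySem.Int.mod (-a * (PySem.Int.floordiv (c + 1) 2)) c]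
       else if PySem.Int.mod a 2 = 1 then []
       else [PySem.Int.mod (-(PySem.Int.floordiv a 2)) (PySem.Int.floordiv c 2),
             PySem.Int.mod (-(PySem.Int.floordiv a 2)) (PySem.Int.floordiv c 2) + PySem.Int.floordiv c 2]) := by
    rw [PySem.Int.mod_eq_emod_of_pos (show (0:Int) < 2 by omega),
        PySem.Int.mod_eq_emod_of_pos (show (0:Int) < 2 by omega)]
    rcases Int.emod_two_eq c with h | h
    · rw [if_neg (by omega)]
      rcases Int.emod_two_eq a with h' | h'
      · rw [if_neg (by omega)]
        exact pv_bs_even_even a c hcpos h h'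
      · rw [if_pos h']
        exact pv_bs_even_odd a c hcpos h h'
    · rw [if_pos h]
      exact pv_bs_odd a c hcpos h
  have hes : (PySem.List.pyRange 0 (PySem.Int.floordiv (PySem.Int.floordiv size a) c) 1).filter
      (fun e => decide (PySem.Int.mod (2 * e) (PySem.Int.floordiv (PySem.Int.floordiv size a) c) = 0)) =
      (if PySem.Int.mod (PySem.Int.floordiv (PySem.Int.floordiv size a) c) 2 = 1 then ([0] : List Int)
       else [0, PySem.Int.floordiv (PySem.Int.floordiv (PySem.Int.floordiv size a) c) 2]) := by
    rw [PySem.Int.mod_eq_emod_of_pos (show (0:Int) < 2 by omega)]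
    rcases Int.emod_two_eq (PySem.Int.floordiv (PySem.Int.floordiv size a) c) with h | h
    · rw [if_neg (by omega)]
      exact pv_es_even _ (by rw [hfe]; exact hf1) h
    · rw [if_pos h]
      exact pv_es_odd _ (by rw [hfe]; exact hf1) h
  rw [pvBE, hbs, hes]

-- ===== VERDICT (by name: the statement is the Claim_ definition above) =====
theorem base_mono_2_spec : Claim_equal_base_mono_2 := by
  intro size _
  unfold Spec_base_mono_2
  rw [pv_A_canon, pv_B_canon]
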